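-- pv_equiv track=rewrite | github.com/Natnael-Alemseged/brownfield-cartographer | src/tools/repo_tools.py | analyze_git_progression
-- ===== SOURCE A (Python) =====
-- def analyze_git_progression(history_text: str) -> str:
--     """Check for atomic commits and temporal evolution (progression patterns vs bulk uploads)."""
--     commits = history_text.strip().split("\n")
--     if not commits or len(commits) == 1:
--         return "Single 'init/bulk' commit found. Potential violation of 'Atomic Progression' rubric. (Status: BULK_UPLOAD)"
--
--     # Extract chronological order (oldest first if --reverse was used)
--     # We look for phase transitions
--     history_lower = history_text.lower()
--
--     phases = {
--         "Infrastructure": ['setup', 'init', 'skeleton', 'env', 'config', 'dependencies', 'uv', 'docker'],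
--         "Investigation": ['tool', 'detective', 'sandbox', 'repo_tools', 'doc_tools', 'ast'],
--         "Evaluation": ['judge', 'prosecutor', 'defense', 'tech_lead', 'opinion', 'rubric'],
--         "Synthesis": ['justice', 'aggregator', 'synthesis', 'report', 'markdown']
--     }
--
--     found_phases = []
--     current_phase_idx = -1
--     out_of_order = False
--
--     for commit in commits:
--         commit_lower = commit.lower()
--         for phase_name, keywords in phases.items():
--             if any(k in commit_lower for k in keywords):
--                 if phase_name not in found_phases:
--                     found_phases.append(phase_name)
--                     # Check if phases follow logical order
--                     new_idx = list(phases.keys()).index(phase_name)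
--                     if new_idx < current_phase_idx:
--                         out_of_order = True
--                     current_phase_idx = new_idx
--                 break
--
--     analysis = []
--     analysis.append(f"[VERIFIED] {len(commits)} atomic commits detected.")
--
--     if len(found_phases) >= 3:
--         analysis.append(f"[SUCCESS] Logical progression detected through phases: {', '.join(found_phases)}.")
--         if out_of_order:
--             analysis.append("(Note: Occasional circular refactoring detected, but core trajectory is sound.)")
--     else:
--         analysis.append(f"[WARNING] Limited architectural evolution. Only phases found: {', '.join(found_phases) or 'None'}.")
--
--     conventional = any(keyword in history_lower for keyword in ['feat:', 'fix:', 'docs:', 'chore:', 'refactor:'])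
--     if conventional:
--         analysis.append("Excellent use of Conventional Commits for traceability.")
--
--     return "Git Timeline Analysis: " + " ".join(analysis)
-- ===== SOURCE B (Python) =====
-- # B: phase-major decomposition — for each of the four phases find the earliest commit
-- # it claims (matches it and no earlier phase), then sort phases by that first position;
-- # out_of_order is an adjacent decrease in the resulting phase-index order.
--
-- PHASE_NAMES = ["Infrastructure", "Investigation", "Evaluation", "Synthesis"]
-- PHASE_KEYWORDS = [
--     ['setup', 'init', 'skeleton', 'env', 'config', 'dependencies', 'uv', 'docker'],
--     ['tool', 'detective', 'sandbox', 'repo_tools', 'doc_tools', 'ast'],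
--     ['judge', 'prosecutor', 'defense', 'tech_lead', 'opinion', 'rubric'],
--     ['justice', 'aggregator', 'synthesis', 'report', 'markdown'],
-- ]
--
--
-- def _first_claimed(lows, p):
--     """Earliest commit index whose FIRST matching phase is p, else None."""
--     for j, cl in enumerate(lows):
--         if any(k in cl for k in PHASE_KEYWORDS[p]) and \
--                 not any(k in cl for q in range(p) for k in PHASE_KEYWORDS[q]):
--             return j
--     return None
--
--
-- def analyze_git_progression(history_text: str) -> str:
--     commits = history_text.strip().split("\n")
--     if len(commits) <= 1:
--         return "Single 'init/bulk' commit found. Potential violation of 'Atomic Progression' rubric. (Status: BULK_UPLOAD)"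
--
--     lows = [c.lower() for c in commits]
--     pairs = []
--     for p in range(4):
--         fp = _first_claimed(lows, p)
--         if fp is not None:
--             pairs.append((p, fp))
--     pairs = sorted(pairs, key=lambda t: t[1])
--     found_idx = [p for p, _ in pairs]
--     out_of_order = any(b < a for a, b in zip(found_idx, found_idx[1:]))
--     found_names = [PHASE_NAMES[p] for p in found_idx]
--
--     parts = [f"[VERIFIED] {len(commits)} atomic commits detected."]
--     if len(found_idx) >= 3:
--         parts.append(f"[SUCCESS] Logical progression detected through phases: {', '.join(found_names)}.")
--         if out_of_order:
--             parts.append("(Note: Occasional circular refactoring detected, but core trajectory is sound.)")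
--     else:
--         parts.append(f"[WARNING] Limited architectural evolution. Only phases found: {', '.join(found_names) or 'None'}.")
--
--     if any(k in history_text.lower() for k in ['feat:', 'fix:', 'docs:', 'chore:', 'refactor:']):
--         parts.append("Excellent use of Conventional Commits for traceability.")
--
--     return "Git Timeline Analysis: " + " ".join(parts)
-- ===== Notes on version B (the rewrite author's own statement) =====
-- stated objective: alternative
-- what changed: Transposes the traversal: instead of A's single commit-major loop with mutable state (found list, current index, out-of-order flag, per-commit scan over the phase dict), B is phase-major: for each of the four phases it finds the earliest commit that phase claims (matches it and no earlier phase), sorts the phases by that first position to obtain the discovery order, and derives out_of_order afterwards as an adjacent decrease in the sorted index sequence.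
import Mathlib
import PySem

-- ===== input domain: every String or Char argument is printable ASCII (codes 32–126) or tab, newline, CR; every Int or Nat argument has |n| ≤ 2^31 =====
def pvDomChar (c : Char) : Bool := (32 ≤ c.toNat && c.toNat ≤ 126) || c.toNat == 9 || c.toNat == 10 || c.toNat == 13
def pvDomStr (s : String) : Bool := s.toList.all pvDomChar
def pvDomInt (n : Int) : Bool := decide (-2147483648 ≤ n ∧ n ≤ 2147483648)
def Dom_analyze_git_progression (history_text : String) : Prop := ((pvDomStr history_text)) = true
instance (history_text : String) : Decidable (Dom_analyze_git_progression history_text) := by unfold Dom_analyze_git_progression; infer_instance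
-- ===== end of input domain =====

-- B transposes A's commit-major stateful loop into a phase-major pass: for each phase, the
-- earliest commit it claims; phases sorted by that position give the discovery order, and
-- out_of_order is an adjacent decrease there (objective: alternative, not faster).

-- ===== PORT A =====
def pvPhases : List (String × List String) :=
  [("Infrastructure", ["setup", "init", "skeleton", "env", "config", "dependencies", "uv", "docker"]),
   ("Investigation", ["tool", "detective", "sandbox", "repo_tools", "doc_tools", "ast"]),
   ("Evaluation", ["judge", "prosecutor", "defense", "tech_lead", "opinion", "rubric"]),
   ("Synthesis", ["justice", "aggregator", "synthesis", "report", "markdown"])]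

-- A's inner 'for phase_name, keywords in phases.items(): if any(...): ... break'
def pvFindPhase (cl : String) : List (String × List String) → Option String
  | [] => none
  | (n, kws) :: rest =>
      if kws.any (fun k => PySem.Str.isIn k cl) then some n else pvFindPhase cl rest

-- A's loop body, state = (found_phases, current_phase_idx, out_of_order)
def pvStepA (st : List String × Int × Bool) (commit : String) : List String × Int × Bool :=
  match pvFindPhase (PySem.Str.lower commit) pvPhases with
  | none => st
  | some n =>
      if n ∈ st.1 then st
      else
        (st.1 ++ [n], (((PySem.List.index? (pvPhases.map Prod.fst) n).getD 0 : Nat) : Int),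
          st.2.2 || decide ((((PySem.List.index? (pvPhases.map Prod.fst) n).getD 0 : Nat) : Int) < st.2.1))

def analyze_git_progression (history_text : String) : String :=
  let commits := (PySem.Str.split? (PySem.Str.strip history_text) "\n").getD []
  if commits.length = 0 ∨ commits.length = 1 then
    "Single 'init/bulk' commit found. Potential violation of 'Atomic Progression' rubric. (Status: BULK_UPLOAD)"
  else
    let historyLower := PySem.Str.lower history_text
    let st := commits.foldl pvStepA ([], -1, false)
    let analysis : List String :=
      ["[VERIFIED] " ++ PySem.Int.toStr commits.length ++ " atomic commits detected."]
    let analysis :=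
      if 3 ≤ st.1.length then
        let a := analysis ++
          ["[SUCCESS] Logical progression detected through phases: " ++ PySem.Str.join ", " st.1 ++ "."]
        if st.2.2 then
          a ++ ["(Note: Occasional circular refactoring detected, but core trajectory is sound.)"]
        else a
      else
        analysis ++
          ["[WARNING] Limited architectural evolution. Only phases found: " ++
            (let j := PySem.Str.join ", " st.1; if j = "" then "None" else j) ++ "."]
    let analysis :=
      if ["feat:", "fix:", "docs:", "chore:", "refactor:"].any (fun k => PySem.Str.isIn k historyLower) then
        analysis ++ ["Excellent use of Conventional Commits for traceability."]
      else analysis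
    "Git Timeline Analysis: " ++ PySem.Str.join " " analysis

-- ===== PORT B =====
def pvPhaseNames : List String := ["Infrastructure", "Investigation", "Evaluation", "Synthesis"]

def pvPhaseKeywords : List (List String) :=
  [["setup", "init", "skeleton", "env", "config", "dependencies", "uv", "docker"],
   ["tool", "detective", "sandbox", "repo_tools", "doc_tools", "ast"],
   ["judge", "prosecutor", "defense", "tech_lead", "opinion", "rubric"],
   ["justice", "aggregator", "synthesis", "report", "markdown"]]

-- Source B: any(k in cl for k in PHASE_KEYWORDS[p])
def pvMatches (cl : String) (p : Nat) : Bool :=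
  (pvPhaseKeywords.getD p []).any (fun k => PySem.Str.isIn k cl)

-- Source B: any(k in cl for q in range(p) for k in PHASE_KEYWORDS[q])
def pvEarlier (cl : String) (p : Nat) : Bool :=
  (List.range p).any (fun q => pvMatches cl q)

-- Source B's _first_claimed: earliest commit index whose first matching phase is p
def pvFirstClaimed (lows : List String) (p : Nat) : Option Int :=
  ((PySem.List.enumerate lows 0).find? (fun jc => pvMatches jc.2 p && !pvEarlier jc.2 p)).map Prod.fst

def analyze_git_progression_alt (history_text : String) : String :=
  let commits := (PySem.Str.split? (PySem.Str.strip history_text) "\n").getD []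
  if commits.length ≤ 1 then
    "Single 'init/bulk' commit found. Potential violation of 'Atomic Progression' rubric. (Status: BULK_UPLOAD)"
  else
    let lows := commits.map PySem.Str.lower
    let pairs : List (Nat × Int) :=
      (List.range 4).foldl (fun acc p =>
        match pvFirstClaimed lows p with
        | some fp => acc ++ [(p, fp)]
        | none => acc) []
    let pairsS := PySem.List.sorted pairs (fun t => t.2) false
    let foundIdx := pairsS.map Prod.fst
    let outOfOrder := (foundIdx.zip foundIdx.tail).any (fun ab => decide (ab.2 < ab.1))
    let foundNames := foundIdx.map (fun p => pvPhaseNames.getD p "")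
    let parts : List String :=
      ["[VERIFIED] " ++ PySem.Int.toStr commits.length ++ " atomic commits detected."]
    let parts :=
      if 3 ≤ foundIdx.length then
        let a := parts ++
          ["[SUCCESS] Logical progression detected through phases: " ++ PySem.Str.join ", " foundNames ++ "."]
        if outOfOrder then
          a ++ ["(Note: Occasional circular refactoring detected, but core trajectory is sound.)"]
        else a
      else
        parts ++
          ["[WARNING] Limited architectural evolution. Only phases found: " ++
            (let j := PySem.Str.join ", " foundNames; if j = "" then "None" else j) ++ "."]
    let parts :=
      if ["feat:", "fix:", "docs:", "chore:", "refactor:"].any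
          (fun k => PySem.Str.isIn k (PySem.Str.lower history_text)) then
        parts ++ ["Excellent use of Conventional Commits for traceability."]
      else parts
    "Git Timeline Analysis: " ++ PySem.Str.join " " parts

-- ===== PRECONDITION & SPEC =====
def Spec_analyze_git_progression (history_text : String) (out : String) : Prop := out = analyze_git_progression_alt history_text
instance (history_text : String) (out : String) : Decidable (Spec_analyze_git_progression history_text out) := by unfold Spec_analyze_git_progression; infer_instance

-- ===== CLAIM (what is proved, stated in full; the proofs are below) =====
def Claim_equal_analyze_git_progression : Prop := ∀ (history_text : String), Dom_analyze_git_progression history_text → Spec_analyze_git_progression history_text (analyze_git_progression history_text)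

-- ===== LEMMAS AND PROOFS =====

-- the common abstraction: first matching phase index of a (lowered) commit
def pvG (cl : String) : Option Nat := (List.range 4).find? (fun p => pvMatches cl p)
def pvGC (c : String) : Option Nat := pvG (PySem.Str.lower c)
def pvNameOf (i : Nat) : String := pvPhaseNames.getD i ""
def pvLastIdx (D : List Nat) : Int := match D.getLast? with | none => -1 | some i => (i : Int)
def pvOoo (D : List Nat) : Bool := (D.zip D.tail).any (fun p => decide (p.2 < p.1))
def pvStateOf (D : List Nat) : List String × Int × Bool := (D.map pvNameOf, pvLastIdx D, pvOoo D)
def pvIdxStep (d : List Nat) (c : String) : List Nat :=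
  match pvGC c with | some i => PySem.Set.add d i | none => d

-- first-occurrence dedup with an explicit seen-set (proof view of PySem.List.dedup)
def pvDedupA (seen : List Nat) : List Nat → List Nat
  | [] => []
  | a :: t => if a ∈ seen then pvDedupA seen t else a :: pvDedupA (a :: seen) t

-- first pair per key, same shape
def pvKeyDedupA (seen : List Nat) : List (Nat × Int) → List (Nat × Int)
  | [] => []
  | x :: t => if x.1 ∈ seen then pvKeyDedupA seen t else x :: pvKeyDedupA (x.1 :: seen) t

-- A's inner phase scan returns exactly the name of the first matching phase index
lemma pvFindPhase_eq (cl : String) : pvFindPhase cl pvPhases = (pvG cl).map pvNameOf := by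
  have h4 : List.range 4 = [0, 1, 2, 3] := rfl
  simp only [pvG, h4, List.find?]
  cases h0 : pvMatches cl 0 <;> cases h1 : pvMatches cl 1 <;> cases h2 : pvMatches cl 2 <;>
    cases h3 : pvMatches cl 3 <;>
    simp_all [pvFindPhase, pvPhases, pvMatches, pvPhaseKeywords, pvNameOf, pvPhaseNames]

-- Source B's per-phase predicate says exactly "the first matching phase is p"
lemma pvPred_eq (cl : String) (p : Nat) (hp : p < 4) :
    (pvMatches cl p && !pvEarlier cl p) = (pvG cl == some p) := by
  have h4 : List.range 4 = [0, 1, 2, 3] := rfl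
  have e0 : List.range 0 = [] := rfl
  have e1 : List.range 1 = [0] := rfl
  have e2 : List.range 2 = [0, 1] := rfl
  have e3 : List.range 3 = [0, 1, 2] := rfl
  interval_cases p <;>
    simp only [pvG, pvEarlier, h4, e0, e1, e2, e3] <;>
    cases h0 : pvMatches cl 0 <;> cases h1 : pvMatches cl 1 <;> cases h2 : pvMatches cl 2 <;>
      cases h3 : pvMatches cl 3 <;> simp_all [List.find?]

lemma pvG_lt {cl : String} {i : Nat} (h : pvG cl = some i) : i < 4 := by
  have := List.mem_range.mp (List.mem_of_find?_eq_some h)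
  omega

lemma pvNameOf_inj : ∀ i < 4, ∀ j < 4, pvNameOf i = pvNameOf j → i = j := by decide

lemma pvIndexName : ∀ i < 4, PySem.List.index? (pvPhases.map Prod.fst) (pvNameOf i) = some i := by decide

lemma pvOoo_append (D : List Nat) (i : Nat) :
    pvOoo (D ++ [i])
    = (pvOoo D || (match D.getLast? with | none => false | some a => decide (i < a))) := by
  induction D with
  | nil => simp [pvOoo]
  | cons a t ih =>
      cases t with
      | nil => simp [pvOoo]
      | cons b t' =>
          have h := ih
          simp only [pvOoo, List.cons_append, List.tail_cons, List.zip_cons_cons,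
            List.any_cons, List.getLast?_cons_cons] at h ⊢
          rw [h]
          cases hd : decide (b < a) <;> simp

lemma pvLastIdx_append (D : List Nat) (i : Nat) : pvLastIdx (D ++ [i]) = (i : Nat) := by
  simp [pvLastIdx]

lemma pvCmp (i : Nat) (D : List Nat) :
    decide ((i : Int) < pvLastIdx D)
    = (match D.getLast? with | none => false | some a => decide (i < a)) := by
  unfold pvLastIdx
  cases D.getLast? with
  | none =>
      show decide ((i : Int) < -1) = false
      exact decide_eq_false (by omega)
  | some a =>
      show decide ((i : Int) < (a : Int)) = decide (i < a)
      simp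

lemma pvAdd_mem {D : List Nat} {i : Nat} (h : i ∈ D) : PySem.Set.add D i = D := by
  simp [PySem.Set.add, h]

lemma pvAdd_not_mem {D : List Nat} {i : Nat} (h : i ∉ D) : PySem.Set.add D i = D ++ [i] := by
  simp [PySem.Set.add, h]

-- A's step from an abstract state is the abstract view of the index step
lemma pvStep_eq (c : String) (D : List Nat) (hD : ∀ x ∈ D, x < 4) :
    pvStepA (pvStateOf D) c = pvStateOf (pvIdxStep D c) := by
  have hpe : pvFindPhase (PySem.Str.lower c) pvPhases = (pvGC c).map pvNameOf :=
    pvFindPhase_eq (PySem.Str.lower c)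
  unfold pvStepA pvIdxStep
  rw [hpe]
  cases hp : pvGC c with
  | none => rfl
  | some i =>
      have hi : i < 4 := pvG_lt hp
      simp only [Option.map_some]
      by_cases hmem : i ∈ D
      · have hm : pvNameOf i ∈ (pvStateOf D).1 := by
          simp only [pvStateOf, List.mem_map]
          exact ⟨i, hmem, rfl⟩
        rw [if_pos hm, pvAdd_mem hmem]
      · have hnm : pvNameOf i ∉ (pvStateOf D).1 := by
          simp only [pvStateOf, List.mem_map]
          rintro ⟨x, hx, hxe⟩
          exact hmem (pvNameOf_inj x (hD x hx) i hi hxe ▸ hx)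
        rw [if_neg hnm, pvAdd_not_mem hmem, pvIndexName i hi]
        simp only [pvStateOf, Option.getD_some, List.map_append, List.map_cons, List.map_nil,
          pvLastIdx_append, pvOoo_append]
        refine Prod.ext rfl (Prod.ext rfl ?_)
        show (pvOoo D || decide (((i : Nat) : Int) < pvLastIdx D))
            = (pvOoo D || match D.getLast? with | none => false | some a => decide (i < a))
        rw [pvCmp i D]

lemma pvIdxStep_lt {D : List Nat} (c : String) (hD : ∀ x ∈ D, x < 4) :
    ∀ x ∈ pvIdxStep D c, x < 4 := by
  unfold pvIdxStep
  cases hp : pvGC c with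
  | none => exact hD
  | some i =>
      have hi : i < 4 := pvG_lt hp
      dsimp only
      intro x hx
      by_cases hmem : i ∈ D
      · rw [pvAdd_mem hmem] at hx
        exact hD x hx
      · rw [pvAdd_not_mem hmem] at hx
        rcases List.mem_append.mp hx with h | h
        · exact hD x h
        · simp at h; omega

-- the A-side invariant: A's fold from stateOf D equals stateOf of the index fold from D
lemma pvLoop_eq : ∀ (cs : List String) (D : List Nat), (∀ x ∈ D, x < 4) →
    cs.foldl pvStepA (pvStateOf D) = pvStateOf (cs.foldl pvIdxStep D) := by
  intro cs
  induction cs with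
  | nil => intro D _; rfl
  | cons c t ih =>
      intro D hD
      rw [List.foldl_cons, List.foldl_cons, pvStep_eq c D hD]
      exact ih _ (pvIdxStep_lt c hD)

-- Source B's append-loop over range(4) is a filterMap
lemma pvPairsLoop (lows : List String) :
    ∀ (ps : List Nat) (acc : List (Nat × Int)),
      ps.foldl (fun acc p =>
        match pvFirstClaimed lows p with
        | some fp => acc ++ [(p, fp)]
        | none => acc) acc
      = acc ++ ps.filterMap (fun p => (pvFirstClaimed lows p).map (fun fp => (p, fp))) := by
  intro ps
  induction ps with
  | nil => intro acc; simp
  | cons p t ih =>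
      intro acc
      cases hp : pvFirstClaimed lows p <;> simp [hp, ih]

-- A's index fold is a fold of Set.add over the claimed phases
lemma pvIdxFold : ∀ (cs : List String) (acc : List Nat),
    cs.foldl pvIdxStep acc = (cs.filterMap pvGC).foldl PySem.Set.add acc := by
  intro cs
  induction cs with
  | nil => intro acc; rfl
  | cons c t ih =>
      intro acc
      cases hc : pvGC c <;> simp [pvIdxStep, hc, ih]

-- searching the enumerated commits for phase p = searching the claimed-pairs list
lemma pvFindFilter (p : Nat) : ∀ (l : List (Int × String)),
    ((l.find? (fun jc => pvG jc.2 == some p)).map Prod.fst)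
    = (((l.filterMap (fun jc => (pvG jc.2).map (fun q => (q, jc.1)))).find?
        (fun x => x.1 == p)).map Prod.snd) := by
  intro l
  induction l with
  | nil => rfl
  | cons jc t ih =>
      cases hg : pvG jc.2 with
      | none => simpa [hg] using ih
      | some q =>
          by_cases hq : q = p <;>
            simp [hg, hq, ih]

lemma pvKeyDedupA_sublist : ∀ (l : List (Nat × Int)) (seen : List Nat), (pvKeyDedupA seen l).Sublist l := by
  intro l
  induction l with
  | nil => intro seen; simp [pvKeyDedupA]
  | cons x t ih =>
      intro seen
      rw [pvKeyDedupA]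
      by_cases hx : x.1 ∈ seen
      · rw [if_pos hx]
        exact (ih seen).cons x
      · rw [if_neg hx]
        exact (ih (x.1 :: seen)).cons₂ x

lemma pvKeyDedupA_fst : ∀ (l : List (Nat × Int)) (seen : List Nat),
    (pvKeyDedupA seen l).map Prod.fst = pvDedupA seen (l.map Prod.fst) := by
  intro l
  induction l with
  | nil => intro seen; rfl
  | cons x t ih =>
      intro seen
      rw [pvKeyDedupA, List.map_cons, pvDedupA]
      by_cases hx : x.1 ∈ seen
      · rw [if_pos hx, if_pos hx, ih]
      · rw [if_neg hx, if_neg hx, List.map_cons, ih]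

lemma pvDedupA_congr : ∀ (l : List Nat) (s1 s2 : List Nat), (∀ x, x ∈ s1 ↔ x ∈ s2) →
    pvDedupA s1 l = pvDedupA s2 l := by
  intro l
  induction l with
  | nil => intro s1 s2 _; rfl
  | cons a t ih =>
      intro s1 s2 h
      rw [pvDedupA, pvDedupA]
      by_cases ha : a ∈ s1
      · rw [if_pos ha, if_pos ((h a).mp ha), ih _ _ h]
      · rw [if_neg ha, if_neg (fun hc => ha ((h a).mpr hc))]
        exact congrArg (a :: ·) (ih (a :: s1) (a :: s2) (fun x => by simp [h x]))

lemma pvFoldlAdd : ∀ (l : List Nat) (acc : List Nat),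
    l.foldl PySem.Set.add acc = acc ++ pvDedupA acc l := by
  intro l
  induction l with
  | nil => intro acc; simp [pvDedupA]
  | cons a t ih =>
      intro acc
      rw [List.foldl_cons, pvDedupA]
      by_cases ha : a ∈ acc
      · rw [pvAdd_mem ha, if_pos ha, ih]
      · rw [pvAdd_not_mem ha, if_neg ha, ih,
          pvDedupA_congr t (acc ++ [a]) (a :: acc) (fun x => by simp; tauto)]
        simp

lemma pvDedupA_eq_dedup (l : List Nat) : pvDedupA [] l = PySem.List.dedup l := by
  rw [PySem.List.dedup_eq_ofList, PySem.Set.ofList_eq_foldl, pvFoldlAdd l []]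
  rfl

-- membership in the keyed dedup is exactly "the first pair with this key"
lemma pvMem_keyDedupA : ∀ (l : List (Nat × Int)) (seen : List Nat) (x : Nat × Int),
    x ∈ pvKeyDedupA seen l ↔ (x.1 ∉ seen ∧ l.find? (fun y => y.1 == x.1) = some x) := by
  intro l
  induction l with
  | nil => intro seen x; simp [pvKeyDedupA]
  | cons z t ih =>
      intro seen x
      rw [pvKeyDedupA]
      by_cases hz : z.1 ∈ seen
      · rw [if_pos hz]
        by_cases hzx : z.1 = x.1
        · constructor
          · intro hm
            exact absurd (hzx ▸ hz) ((ih seen x).mp hm).1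
          · rintro ⟨hns, hf⟩
            exact absurd (hzx ▸ hz) hns
        · rw [ih seen x, List.find?_cons_of_neg (by simp [hzx])]
      · rw [if_neg hz]
        by_cases hzx : z.1 = x.1
        · rw [List.find?_cons_of_pos (by simp [hzx])]
          constructor
          · intro hm
            rcases List.mem_cons.mp hm with h | h
            · exact ⟨h ▸ hzx ▸ hz, by rw [h]⟩
            · have := ((ih (z.1 :: seen) x).mp h).1
              simp [hzx] at this
          · rintro ⟨hns, hf⟩
            exact List.mem_cons.mpr (Or.inl (Option.some_injective _ hf).symm)
        · rw [List.find?_cons_of_neg (by simp [hzx])]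
          constructor
          · intro hm
            rcases List.mem_cons.mp hm with h | h
            · exact absurd (congrArg Prod.fst h) (by simpa using (Ne.symm hzx))
            · have := (ih (z.1 :: seen) x).mp h
              refine ⟨fun hc => this.1 (List.mem_cons.mpr (Or.inr hc)), this.2⟩
          · rintro ⟨hns, hf⟩
            refine List.mem_cons.mpr (Or.inr ((ih (z.1 :: seen) x).mpr ⟨?_, hf⟩))
            simp [hns]
            exact fun hc => absurd hc.symm hzx

-- the claimed-pairs list of a commit list, and B's pairs loop in filterMap form
def pvPs (lows : List String) : List (Nat × Int) :=
  (PySem.List.enumerate lows 0).filterMap (fun jc => (pvG jc.2).map (fun q => (q, jc.1)))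

def pvPairsB (lows : List String) : List (Nat × Int) :=
  (List.range 4).filterMap (fun p => ((pvPs lows).find? (fun y => y.1 == p)).map (fun y => (p, y.2)))

lemma pvPs_pairwise (lows : List String) : (pvPs lows).Pairwise (fun a b => a.2 < b.2) := by
  refine List.pairwise_filterMap.mpr ((PySem.List.pairwise_lt_enumerate lows 0).imp ?_)
  intro a b hab x hx y hy
  cases ha : pvG a.2 <;> rw [ha] at hx <;> simp at hx
  cases hb : pvG b.2 <;> rw [hb] at hy <;> simp at hy
  rw [← hx, ← hy]
  exact hab

lemma pvPs_fst_lt (lows : List String) : ∀ x ∈ pvPs lows, x.1 < 4 := by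
  intro x hx
  rcases List.mem_filterMap.mp hx with ⟨jc, _, hjc⟩
  cases hg : pvG jc.2 <;> rw [hg] at hjc <;> simp at hjc
  rw [← hjc]
  exact pvG_lt hg

lemma pvKeyDedup_pairwise (lows : List String) :
    (pvKeyDedupA [] (pvPs lows)).Pairwise (fun a b => a.2 < b.2) :=
  List.Pairwise.sublist (pvKeyDedupA_sublist (pvPs lows) []) (pvPs_pairwise lows)

lemma pvMem_pairsB (lows : List String) (x : Nat × Int) :
    x ∈ pvPairsB lows ↔ x.1 < 4 ∧ (pvPs lows).find? (fun y => y.1 == x.1) = some x := by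
  constructor
  · intro hm
    rcases List.mem_filterMap.mp hm with ⟨p, hp, hpm⟩
    cases hf : (pvPs lows).find? (fun y => y.1 == p) <;> rw [hf] at hpm <;> simp at hpm
    rename_i y
    have hy1 : y.1 = p := by simpa using List.find?_some hf
    have hxy : x = y := by rw [← hpm, ← hy1]
    rw [hxy, hy1]
    exact ⟨List.mem_range.mp hp, hf⟩
  · rintro ⟨h4, hf⟩
    refine List.mem_filterMap.mpr ⟨x.1, List.mem_range.mpr h4, ?_⟩
    rw [hf]
    simp

lemma pvNodup_keyDedup (lows : List String) : (pvKeyDedupA [] (pvPs lows)).Nodup :=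
  (pvKeyDedup_pairwise lows).imp (fun h he => by rw [he] at h; exact lt_irrefl _ h)

lemma pvNodup_pairsB (lows : List String) : (pvPairsB lows).Nodup := by
  have hpw : (pvPairsB lows).Pairwise (fun a b => a.1 < b.1) := by
    refine List.pairwise_filterMap.mpr ((List.pairwise_lt_range).imp ?_)
    intro p q hpq x hx y hy
    cases hf : (pvPs lows).find? (fun z => z.1 == p) <;> rw [hf] at hx <;> simp at hx
    cases hg : (pvPs lows).find? (fun z => z.1 == q) <;> rw [hg] at hy <;> simp at hy
    rw [← hx, ← hy]
    exact hpq
  exact hpw.imp (fun h he => by rw [he] at h; exact lt_irrefl _ h)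

lemma pvPerm (lows : List String) : (pvKeyDedupA [] (pvPs lows)).Perm (pvPairsB lows) := by
  refine (List.perm_ext_iff_of_nodup (pvNodup_keyDedup lows) (pvNodup_pairsB lows)).mpr ?_
  intro a
  rw [pvMem_keyDedupA, pvMem_pairsB]
  constructor
  · rintro ⟨-, hf⟩
    exact ⟨pvPs_fst_lt lows a (List.mem_of_find?_eq_some hf), hf⟩
  · rintro ⟨-, hf⟩
    exact ⟨List.not_mem_nil, hf⟩

lemma pvSortedPairs (lows : List String) :
    PySem.List.sorted (pvPairsB lows) (fun t => t.2) false = pvKeyDedupA [] (pvPs lows) :=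
  PySem.List.sorted_eq_of_perm_of_pairwise_lt _ _ _ (pvPerm lows) (pvKeyDedup_pairwise lows)

lemma pvMapFst_ps (lows : List String) : (pvPs lows).map Prod.fst = lows.filterMap pvG := by
  rw [pvPs, List.map_filterMap]
  have h1 : (fun jc : Int × String => ((pvG jc.2).map (fun q => (q, jc.1))).map Prod.fst)
      = (fun jc : Int × String => pvG jc.2) := by
    funext jc
    cases hg : pvG jc.2 <;> simp
  rw [h1]
  conv_rhs => rw [← PySem.List.map_snd_enumerate lows 0]
  rw [List.filterMap_map]
  rfl

-- ===== VERDICT (by name: the statement is the Claim_ definition above) =====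
theorem analyze_git_progression_spec : Claim_equal_analyze_git_progression := by
  intro s _
  unfold Spec_analyze_git_progression analyze_git_progression analyze_git_progression_alt
  generalize (PySem.Str.split? (PySem.Str.strip s) "\n").getD [] = commits
  by_cases hlen : commits.length ≤ 1
  · rw [if_pos (by omega : commits.length = 0 ∨ commits.length = 1), if_pos hlen]
  · rw [if_neg (by omega : ¬ (commits.length = 0 ∨ commits.length = 1)), if_neg hlen]
    dsimp only
    -- B's pairs loop is pvPairsB of the lowered commits
    have hpairs : (List.range 4).foldl (fun acc p =>
        match pvFirstClaimed (commits.map PySem.Str.lower) p with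
        | some fp => acc ++ [(p, fp)]
        | none => acc) []
        = pvPairsB (commits.map PySem.Str.lower) := by
      rw [pvPairsLoop (commits.map PySem.Str.lower) (List.range 4) [], List.nil_append, pvPairsB]
      apply List.filterMap_congr
      intro p hp
      have hp4 : p < 4 := List.mem_range.mp hp
      have hpred : (fun jc : Int × String => pvMatches jc.2 p && !pvEarlier jc.2 p)
          = (fun jc : Int × String => pvG jc.2 == some p) := by
        funext jc
        exact pvPred_eq jc.2 p hp4
      have hff := pvFindFilter p (PySem.List.enumerate (commits.map PySem.Str.lower) 0)
      rw [show (PySem.List.enumerate (commits.map PySem.Str.lower) 0).filterMap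
            (fun jc => (pvG jc.2).map (fun q => (q, jc.1)))
          = pvPs (commits.map PySem.Str.lower) from rfl] at hff
      rw [pvFirstClaimed, hpred, hff, Option.map_map]
      rfl
    -- B's discovered index list is the common D
    have hfound : (PySem.List.sorted (pvPairsB (commits.map PySem.Str.lower))
          (fun t => t.2) false).map Prod.fst
        = commits.foldl pvIdxStep [] := by
      rw [pvSortedPairs, pvKeyDedupA_fst, pvMapFst_ps, pvDedupA_eq_dedup,
        PySem.List.dedup_eq_ofList, PySem.Set.ofList_eq_foldl, List.filterMap_map,
        pvIdxFold commits []]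
      rfl
    -- A's loop result, abstractly
    have hst : commits.foldl pvStepA ([], -1, false)
        = pvStateOf (commits.foldl pvIdxStep []) := by
      exact pvLoop_eq commits [] (by simp)
    rw [hst, hpairs, hfound]
    simp only [pvStateOf, pvOoo, List.length_map]
    rw [show pvNameOf = (fun i => pvPhaseNames.getD i "") from rfl]
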